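-- pv_equiv track=rewrite | github.com/thefalk305/falkmans_web_vite---redo | py/generate_branches.py | determine_level_and_position
-- ===== SOURCE A (Python) =====
-- def determine_level_and_position(branch_id):
--     """Determine the level and position in level for a branch ID"""
--     if branch_id < 1:
--         return 0, 0
--
--     level = 0
--     temp_id = branch_id
--     while temp_id > 1:
--         temp_id //= 2
--         level += 1
--
--     # Position in level (0-indexed)
--     level_start = 2**level if level > 0 else 1
--     position_in_level = branch_id - level_start
--
--     return level, position_in_level
-- ===== SOURCE B (Python) =====
-- def determine_level_and_position(branch_id):
--     """Determine the level and position in level for a branch ID"""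
--     if branch_id < 1:
--         return 0, 0
--     level = branch_id.bit_length() - 1
--     return level, branch_id - (1 << level)
-- ===== Notes on version B (the rewrite author's own statement) =====
-- stated objective: idiomatic
-- what changed: Replaces the halving loop and conditional power-of-two with a closed-form bit_length computation: level = bit_length-1, position = branch_id - (1 << level).
import Mathlib
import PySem

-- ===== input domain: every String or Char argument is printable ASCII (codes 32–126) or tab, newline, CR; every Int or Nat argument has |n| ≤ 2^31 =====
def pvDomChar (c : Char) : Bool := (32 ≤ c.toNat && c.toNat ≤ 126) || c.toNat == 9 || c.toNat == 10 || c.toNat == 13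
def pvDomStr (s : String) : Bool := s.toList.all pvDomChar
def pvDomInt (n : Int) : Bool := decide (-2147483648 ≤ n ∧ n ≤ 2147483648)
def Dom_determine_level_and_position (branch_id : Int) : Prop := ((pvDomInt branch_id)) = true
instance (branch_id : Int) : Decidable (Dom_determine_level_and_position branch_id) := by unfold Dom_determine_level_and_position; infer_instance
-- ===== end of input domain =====

-- B replaces A's halving loop by the closed-form bit_length computation (idiomatic).

-- ===== PORT A =====
-- the 'while temp_id > 1: temp_id //= 2; level += 1' loop, as structural recursion on temp_id
def detLoopA (temp_id : Int) (level : Int) : Int :=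
  if h : temp_id > 1 then
    detLoopA (PySem.Int.floordiv temp_id 2) (level + 1)
  else level
termination_by temp_id.toNat
decreasing_by
  simp only [PySem.Int.floordiv]
  have : temp_id.fdiv 2 = temp_id / 2 := Int.fdiv_eq_ediv_of_nonneg _ (by norm_num)
  omega

def determine_level_and_position (branch_id : Int) : Int × Int :=
  if branch_id < 1 then (0, 0)
  else
    let level := detLoopA branch_id 0
    let level_start : Int := if level > 0 then 2 ^ level.toNat else 1
    (level, branch_id - level_start)

-- ===== PORT B =====
def determine_level_and_position_alt (branch_id : Int) : Int × Int :=
  if branch_id < 1 then (0, 0)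
  else
    -- Python: branch_id.bit_length() - 1; for branch_id ≥ 1 this is Nat.log2
    let level : Int := (Nat.log2 branch_id.toNat : Int)
    (level, branch_id - (1 <<< level.toNat))

-- ===== PRECONDITION & SPEC =====
def Spec_determine_level_and_position (branch_id : Int) (out : Int × Int) : Prop := out = determine_level_and_position_alt branch_id
instance (branch_id : Int) (out : Int × Int) : Decidable (Spec_determine_level_and_position branch_id out) := by unfold Spec_determine_level_and_position; infer_instance

-- ===== CLAIM (what is proved, stated in full; the proofs are below) =====
def Claim_equal_determine_level_and_position : Prop := ∀ (branch_id : Int), Dom_determine_level_and_position branch_id → Spec_determine_level_and_position branch_id (determine_level_and_position branch_id)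

-- ===== LEMMAS AND PROOFS =====
lemma detLoopA_eq (n : Int) (h : 1 ≤ n) (level : Int) :
    detLoopA n level = level + (Nat.log2 n.toNat : Int) := by
  induction hk : n.toNat using Nat.strong_induction_on generalizing n level with
  | _ k ih =>
    subst hk
    rw [detLoopA.eq_def]
    by_cases h2 : n > 1
    · have hfd : PySem.Int.floordiv n 2 = n / 2 := by
        simp only [PySem.Int.floordiv]
        exact Int.fdiv_eq_ediv_of_nonneg _ (by norm_num)
      rw [dif_pos h2, hfd]
      have h1 : 1 ≤ n / 2 := by omega
      have hlt : (n / 2).toNat < n.toNat := by omega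
      rw [ih _ hlt _ h1 _ rfl]
      have hto : (n / 2).toNat = n.toNat / 2 := by omega
      rw [hto]
      have hlog : Nat.log2 n.toNat = Nat.log2 (n.toNat / 2) + 1 := by
        rw [Nat.log2_eq_log_two, Nat.log2_eq_log_two, Nat.log_div_base 2 n.toNat]
        have := Nat.log_pos (b := 2) (by norm_num) (by omega : 2 ≤ n.toNat)
        omega
      rw [hlog]
      push_cast
      ring
    · rw [dif_neg h2]
      have : n = 1 := by omega
      subst this
      norm_num [Nat.log2]

theorem determine_level_and_position_spec : Claim_equal_determine_level_and_position := by
  intro branch_id _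
  unfold Spec_determine_level_and_position determine_level_and_position determine_level_and_position_alt
  by_cases h : branch_id < 1
  · simp [h]
  · rw [if_neg h, if_neg h]
    have h1 : 1 ≤ branch_id := by omega
    simp only [detLoopA_eq branch_id h1 0, zero_add]
    by_cases hl : (Nat.log2 branch_id.toNat : Int) > 0
    · rw [if_pos hl]
      rw [Nat.shiftLeft_eq]
      push_cast
      ring_nf
    · rw [if_neg hl]
      have h0 : Nat.log2 branch_id.toNat = 0 := by omega
      rw [h0]
      simp
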